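-- pv_equiv track=rewrite | github.com/watchduck/convex_polyhedra | utils/polyhedron_properties.py | ps_aaa
-- ===== SOURCE A (Python) =====
-- from itertools import permutations, product
--
-- def ps_aaa(a):  # 8
--     coordinate_triples = []
--     signs_iter = product([1, -1], repeat=3)
--     signs_triples = [s for s in signs_iter]
--     for signs_triple in signs_triples:
--         coordinate_triples.append(
--             [s * a for s in signs_triple]
--         )
--     return coordinate_triples
-- ===== SOURCE B (Python) =====
-- def ps_aaa(a):  # 8
--     # Build the sign combinations by repeated doubling: start from [[]]
--     # and prepend +a / -a three times.
--     triples = [[]]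
--     for _ in range(3):
--         triples = [[v] + t for v in (a, -a) for t in triples]
--     return triples
-- ===== Notes on version B (the rewrite author's own statement) =====
-- stated objective: alternative
-- what changed: Replaced enumeration of itertools.product sign tuples followed by per-element multiplication with an accumulator-doubling construction that starts from [[]] and prepends +a/-a three times, never computing sign tuples or multiplying.
import Mathlib
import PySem

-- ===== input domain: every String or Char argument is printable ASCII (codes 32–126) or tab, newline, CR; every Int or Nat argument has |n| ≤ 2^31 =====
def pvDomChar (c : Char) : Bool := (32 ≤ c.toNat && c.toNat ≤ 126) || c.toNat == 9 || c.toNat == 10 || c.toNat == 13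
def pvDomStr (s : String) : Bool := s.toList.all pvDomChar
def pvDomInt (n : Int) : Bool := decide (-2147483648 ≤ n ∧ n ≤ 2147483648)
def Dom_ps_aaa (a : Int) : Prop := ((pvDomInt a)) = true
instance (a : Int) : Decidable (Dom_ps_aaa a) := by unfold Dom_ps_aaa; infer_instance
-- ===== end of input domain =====

-- B replaces product-enumeration + per-element multiplication with a doubling
-- accumulator that prepends +a/-a three times (objective: alternative).

-- ===== PORT A =====
def ps_aaa (a : Int) : List (List Int) :=
  -- itertools.product([1, -1], repeat=3), hand-ported exactly as three nested passes
  let signs_triples : List (List Int) :=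
    ([1, -1] : List Int).flatMap (fun s1 =>
      ([1, -1] : List Int).flatMap (fun s2 =>
        ([1, -1] : List Int).map (fun s3 => [s1, s2, s3])))
  signs_triples.foldl (fun coordinate_triples signs_triple =>
    coordinate_triples ++ [signs_triple.map (fun s => s * a)]) []

-- ===== PORT B =====
def ps_aaa_alt (a : Int) : List (List Int) :=
  (List.range 3).foldl
    (fun triples _ =>
      ([a, -a] : List Int).flatMap (fun v => triples.map (fun t => v :: t)))
    [[]]

-- ===== PRECONDITION & SPEC =====
def Spec_ps_aaa (a : Int) (out : List (List Int)) : Prop := out = ps_aaa_alt a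
instance (a : Int) (out : List (List Int)) : Decidable (Spec_ps_aaa a out) := by unfold Spec_ps_aaa; infer_instance

-- ===== CLAIM =====
def Claim_equal_ps_aaa : Prop := ∀ (a : Int), Dom_ps_aaa a → Spec_ps_aaa a (ps_aaa a)

-- ===== LEMMAS AND PROOFS =====

-- ===== VERDICT =====
theorem ps_aaa_spec : Claim_equal_ps_aaa := by
  intro a _
  show ps_aaa a = ps_aaa_alt a
  simp [ps_aaa, ps_aaa_alt, List.range_succ]
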